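-- pv_equiv track=rewrite | github.com/amritanandsingh/DSA | DP/6-ninja/recrusion.py | expected_bruteforce
-- ===== SOURCE A (Python) =====
-- from typing import List, Tuple
-- from functools import lru_cache
--
-- def expected_bruteforce(matrix: List[List[int]]) -> int:
--     """Exact oracle for small n by trying all valid schedules (no same consecutive)."""
--     n = len(matrix)
--
--     @lru_cache(None)
--     def dfs(day: int, last: int) -> int:
--         if day == n:
--             return 0
--         best = 0
--         for act in range(3):
--             if act != last:
--                 best = max(best, matrix[day][act] + dfs(day + 1, act))
--         return best
--
--     return dfs(0, -1)
-- ===== SOURCE B (Python) =====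
-- def expected_bruteforce(matrix):
--     """Bottom-up DP: dp[last] = best points from current day onward given previous activity."""
--     dp = {-1: 0, 0: 0, 1: 0, 2: 0}
--     for row in reversed(matrix):
--         dp = {last: max([0] + [row[a] + dp[a] for a in range(3) if a != last])
--               for last in (-1, 0, 1, 2)}
--     return dp[-1]
-- ===== Notes on version B (the rewrite author's own statement) =====
-- stated objective: alternative
-- what changed: Replaced the memoized top-down recursion over (day,last) with a bottom-up iterative DP that keeps only a 4-entry table for the previous-activity state, sweeping the days back to front.
import Mathlib
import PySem

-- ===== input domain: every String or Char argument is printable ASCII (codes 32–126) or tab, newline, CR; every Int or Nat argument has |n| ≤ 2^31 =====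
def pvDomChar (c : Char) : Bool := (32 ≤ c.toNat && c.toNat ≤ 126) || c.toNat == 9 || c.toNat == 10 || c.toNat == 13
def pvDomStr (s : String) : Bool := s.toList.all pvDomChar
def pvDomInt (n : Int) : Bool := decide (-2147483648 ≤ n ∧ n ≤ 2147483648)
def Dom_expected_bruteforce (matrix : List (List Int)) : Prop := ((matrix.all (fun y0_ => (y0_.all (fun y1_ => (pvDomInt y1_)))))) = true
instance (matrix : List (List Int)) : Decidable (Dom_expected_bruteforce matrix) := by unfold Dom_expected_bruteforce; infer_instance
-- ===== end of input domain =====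

-- B replaces A's memoized top-down recursion by a bottom-up sweep keeping a 4-entry DP table (objective: alternative decomposition).

-- ===== PORT A =====
-- dfs(day, last): recursion on the remaining rows (day advances = head of the list consumed).
-- matrix[day][act] is ported as pyGet?; Pre_ guarantees the index is in range, so getD 0 is never taken.
def pvDfsA : List (List Int) → Int → Int
  | [], _ => 0
  | row :: rest, last =>
      (List.range 3).foldl
        (fun best act =>
          if (act : Int) ≠ last then
            max best ((PySem.List.pyGet? row (act : Int)).getD 0 + pvDfsA rest act)
          else best) 0

def expected_bruteforce (matrix : List (List Int)) : Int := pvDfsA matrix (-1)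

-- ===== PORT B =====
-- one backward DP step: state is (dp[-1], dp[0], dp[1], dp[2])
def pvStepB (row : List Int) (dp : Int × Int × Int × Int) : Int × Int × Int × Int :=
  let c0 := (PySem.List.pyGet? row 0).getD 0 + dp.2.1
  let c1 := (PySem.List.pyGet? row 1).getD 0 + dp.2.2.1
  let c2 := (PySem.List.pyGet? row 2).getD 0 + dp.2.2.2
  (max 0 (max c0 (max c1 c2)), max 0 (max c1 c2), max 0 (max c0 c2), max 0 (max c0 c1))

def expected_bruteforce_alt (matrix : List (List Int)) : Int :=
  (matrix.foldr pvStepB (0, 0, 0, 0)).1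

-- ===== PRECONDITION & SPEC =====
-- Pre_ excludes exactly the inputs on which Python A raises IndexError: any row shorter than 3.
def Pre_expected_bruteforce (matrix : List (List Int)) : Prop :=
  ∀ row ∈ matrix, 3 ≤ row.length
instance (matrix : List (List Int)) : Decidable (Pre_expected_bruteforce matrix) := by
  unfold Pre_expected_bruteforce; infer_instance

def pvWitness_expected_bruteforce : List (List Int) := [[1, 2, 3], [3, 1, 2]]

def Spec_expected_bruteforce (matrix : List (List Int)) (out : Int) : Prop := out = expected_bruteforce_alt matrix
instance (matrix : List (List Int)) (out : Int) : Decidable (Spec_expected_bruteforce matrix out) := by unfold Spec_expected_bruteforce; infer_instance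

-- ===== CLAIM (what is proved, stated in full; the proofs are below) =====
def Claim_equal_expected_bruteforce : Prop := ∀ (matrix : List (List Int)), Dom_expected_bruteforce matrix → Pre_expected_bruteforce matrix → Spec_expected_bruteforce matrix (expected_bruteforce matrix)

-- ===== LEMMAS AND PROOFS =====
-- The recursion and the backward DP agree on all four previous-activity states.
theorem pvDfsA_eq_foldr (rows : List (List Int)) :
    (pvDfsA rows (-1), pvDfsA rows 0, pvDfsA rows 1, pvDfsA rows 2)
      = rows.foldr pvStepB (0, 0, 0, 0) := by
  induction rows with
  | nil => simp [pvDfsA]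
  | cons row rest ih =>
    simp only [Prod.ext_iff] at ih
    simp only [List.foldr_cons, ← ih, pvStepB, pvDfsA,
      show List.range 3 = [0, 1, 2] from rfl]
    norm_num

-- ===== VERDICT (by name: the statement is the Claim_ definition above) =====
theorem expected_bruteforce_spec : Claim_equal_expected_bruteforce := by
  intro matrix _ _
  unfold Spec_expected_bruteforce expected_bruteforce expected_bruteforce_alt
  rw [← pvDfsA_eq_foldr]
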